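-- pv_equiv track=rewrite | github.com/kaellandrade/SI_UFS | unid_2/lista7/quest_1.py | filterValisSum
-- ===== SOURCE A (Python) =====
-- def filterValisSum(l):
--     soma_pares = 0
--     soma_impares = 0
--     if(l[0] == 0):
--         return False
--     for i in range(len(l)):
--         if(i % 2 == 0):
--             soma_pares += l[i]
--         else:
--             soma_impares += l[i]
--     return soma_impares == soma_pares
-- ===== SOURCE B (Python) =====
-- def filterValisSum(l):
--     if l[0] == 0:
--         return False
--     return sum(l[0::2]) == sum(l[1::2])
-- ===== Notes on version B (the rewrite author's own statement) =====
-- stated objective: idiomatic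
-- what changed: Replaces the indexed loop with its i%2 branch and two running accumulators by extracting the even- and odd-index strided slices l[0::2] and l[1::2] and comparing their sums in two staged passes; the slicing and sum() run at C level instead of a Python-level per-element loop.
import Mathlib
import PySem

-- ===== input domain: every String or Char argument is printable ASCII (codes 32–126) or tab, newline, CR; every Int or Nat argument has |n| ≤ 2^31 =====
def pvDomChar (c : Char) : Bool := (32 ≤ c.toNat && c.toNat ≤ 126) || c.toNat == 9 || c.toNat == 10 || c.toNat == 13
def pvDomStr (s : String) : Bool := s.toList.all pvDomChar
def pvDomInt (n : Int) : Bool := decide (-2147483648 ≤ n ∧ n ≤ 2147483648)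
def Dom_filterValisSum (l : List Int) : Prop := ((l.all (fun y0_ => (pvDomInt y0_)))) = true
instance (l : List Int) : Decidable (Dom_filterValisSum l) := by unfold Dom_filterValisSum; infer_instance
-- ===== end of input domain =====

-- B replaces A's indexed parity loop by extracting the two strided slices l[0::2] and l[1::2] and comparing their sums (objective: idiomatic).

-- ===== PORT A =====
-- A: two accumulators, loop over range(len(l)) branching on i % 2; indexing the first element raises IndexError on the empty list (excluded by Pre_).
def filterValisSum (l : List Int) : Bool :=
  match PySem.List.pyGet? l 0 with
  | none => false   -- unreachable under Pre_ (Python raises IndexError here)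
  | some v =>
    if v == 0 then false
    else
      let p := (PySem.List.pyRange 0 (PySem.List.len l) 1).foldl
        (fun (acc : Int × Int) (i : Int) =>
          if i % 2 == 0 then (acc.1 + PySem.List.pyGetD l i 0, acc.2)
          else (acc.1, acc.2 + PySem.List.pyGetD l i 0)) (0, 0)
      p.2 == p.1

-- ===== PORT B =====
-- B: sum(l[0::2]) == sum(l[1::2]); step 2 ≠ 0 so slice? is always `some`, getD [] only discharges the Option.
def filterValisSum_alt (l : List Int) : Bool :=
  match PySem.List.pyGet? l 0 with
  | none => false   -- unreachable under Pre_ (B's l[0] raises IndexError there too)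
  | some v =>
    if v == 0 then false
    else
      ((PySem.List.slice? l (some 0) none 2).getD []).sum ==
      ((PySem.List.slice? l (some 1) none 2).getD []).sum

-- ===== PRECONDITION & SPEC =====
-- Pre_ excludes only the empty list, on which A's first-element access raises IndexError (B raises there too).
def Pre_filterValisSum (l : List Int) : Prop := l ≠ []
instance (l : List Int) : Decidable (Pre_filterValisSum l) := by unfold Pre_filterValisSum; infer_instance
def pvWitness_filterValisSum : List Int := [1, 2, 1]

def Spec_filterValisSum (l : List Int) (out : Bool) : Prop := out = filterValisSum_alt l
instance (l : List Int) (out : Bool) : Decidable (Spec_filterValisSum l out) := by unfold Spec_filterValisSum; infer_instance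

-- ===== CLAIM (what is proved, stated in full; the proofs are below) =====
def Claim_equal_filterValisSum : Prop := ∀ (l : List Int), Dom_filterValisSum l → Pre_filterValisSum l → Spec_filterValisSum l (filterValisSum l)

-- ===== LEMMAS AND PROOFS =====

-- even-indexed elements of l
def pvEvens : List Int → List Int
  | [] => []
  | [x] => [x]
  | x :: _ :: r => x :: pvEvens r

lemma pvEvens_cons (a : Int) (s : List Int) : pvEvens (a :: s) = a :: pvEvens (s.drop 1) := by
  cases s <;> simp [pvEvens]

-- (pvSums l).1 = sum of even-indexed elements, (pvSums l).2 = sum of odd-indexed elements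
def pvSums : List Int → Int × Int
  | [] => (0, 0)
  | x :: r => ((pvSums r).2 + x, (pvSums r).1)

lemma pvSums_eq_evens (l : List Int) :
    (pvSums l).1 = (pvEvens l).sum ∧ (pvSums l).2 = (pvEvens (l.drop 1)).sum := by
  fun_induction pvEvens l with
  | case1 => simp [pvSums, pvEvens]
  | case2 x => simp [pvSums, pvEvens]
  | case3 x y r ih =>
    obtain ⟨h1, h2⟩ := ih
    constructor
    · simp [pvSums, h1]; ring
    · simp only [List.drop_one, List.tail_cons, pvEvens_cons, pvSums, List.sum_cons, h2]; ring

-- core of slice? with step 2: filterMap of l[2k]? over range ⌈len/2⌉ is pvEvens l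
lemma pvCore (l : List Int) :
    List.filterMap (fun k => l[(2 * (k : Nat))]?) (List.range ((l.length + 1) / 2)) = pvEvens l := by
  fun_induction pvEvens l with
  | case1 => simp
  | case2 x => simp [List.range_succ]
  | case3 x y r ih =>
    have hc : ((x :: y :: r).length + 1) / 2 = (r.length + 1) / 2 + 1 := by
      simp [List.length_cons]; omega
    rw [hc, List.range_succ_eq_map, List.filterMap_cons, List.filterMap_map]
    simp only [Function.comp_def]
    simp only [show ∀ k : Nat, 2 * (Nat.succ k) = 2 * k + 1 + 1 from fun k => by omega]
    simp [ih]

lemma pvSlice_evens (l : List Int) :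
    PySem.List.slice? l (some 0) none 2 = some (pvEvens l) := by
  unfold PySem.List.slice? PySem.List.sliceIndices
  norm_num
  have hc : (if 0 < l.length then (((l.length : Int) + 2 - 1) / 2).toNat else 0) = (l.length + 1) / 2 := by
    split_ifs with h <;> omega
  have harg : (fun x : Nat => l[((2:Int) * (x:Nat)).toNat]?) = (fun k : Nat => l[(2 * k)]?) := by
    funext k; rw [show ((2:Int) * (k:Nat)).toNat = 2 * k from by omega]
  rw [hc, harg, pvCore]

lemma pvSlice_odds (l : List Int) :
    PySem.List.slice? l (some 1) none 2 = some (pvEvens (l.drop 1)) := by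
  unfold PySem.List.slice? PySem.List.sliceIndices
  norm_num
  cases l with
  | nil => simp [pvEvens]
  | cons x r =>
    have hmin : min (1 : Int) ((x :: r).length : Int) = 1 := by
      simp only [List.length_cons]; push_cast; omega
    rw [hmin]
    have hc : (if 1 < (x :: r).length then ((((x :: r).length : Int) - 1 + 2 - 1) / 2).toNat else 0)
        = (r.length + 1) / 2 := by
      by_cases h : 1 < (x :: r).length
      · rw [if_pos h]
        simp only [List.length_cons]
        omega
      · rw [if_neg h]
        simp only [List.length_cons] at h
        omega
    have harg : (fun k : Nat => (x :: r)[((1:Int) + 2 * (k:Nat)).toNat]?) = (fun k : Nat => r[(2 * k)]?) := by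
      funext k
      rw [show ((1:Int) + 2 * (k:Nat)).toNat = 2 * k + 1 from by omega]
      simp
    rw [hc, harg, pvCore]
    simp

lemma pvAuxA (l : List Int) : ∀ (t : List Int) (s : ℕ) (p q : Int), l.drop s = t →
    (List.range' s t.length).foldl
      (fun (acc : Int × Int) (k : ℕ) =>
        if ((k : Int)) % 2 == 0 then (acc.1 + PySem.List.pyGetD l (k : Int) 0, acc.2)
        else (acc.1, acc.2 + PySem.List.pyGetD l (k : Int) 0)) (p, q)
    = if s % 2 = 0 then (p + (pvSums t).1, q + (pvSums t).2)
      else (p + (pvSums t).2, q + (pvSums t).1) := by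
  intro t
  induction t with
  | nil => intro s p q _; simp [pvSums]
  | cons x rest ih =>
    intro s p q hs
    have hlen : s < l.length := by
      by_contra h
      simp [List.drop_eq_nil_of_le (le_of_not_gt h)] at hs
    have hdec := List.drop_eq_getElem_cons hlen
    rw [hs] at hdec
    obtain ⟨hx, hrest⟩ : x = l[s] ∧ rest = l.drop (s + 1) := by
      injection hdec with h1 h2; exact ⟨h1, h2⟩
    have hget : PySem.List.pyGetD l (s : Int) 0 = x := by
      rw [PySem.List.pyGetD_natCast]
      simp [hlen, hx]
    rw [List.length_cons, List.range'_succ, List.foldl_cons]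
    have hcast : (((s : Int)) % 2 == 0) = decide (s % 2 = 0) := by
      by_cases h : s % 2 = 0 <;> simp [h] <;> omega
    rw [hcast, hget]
    by_cases h0 : s % 2 = 0
    · have h1 : (s + 1) % 2 = 1 := by omega
      rw [if_pos (by simp [h0]), ih (s + 1) (p + x) q hrest.symm]
      simp [h0, h1, pvSums]
      ring
    · have h0' : s % 2 = 1 := by omega
      have h1 : (s + 1) % 2 = 0 := by omega
      rw [if_neg (by simp [h0]), ih (s + 1) p (q + x) hrest.symm]
      simp [h0, h1, pvSums]
      ring

lemma pvLoopA (l : List Int) :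
    (PySem.List.pyRange 0 (PySem.List.len l) 1).foldl
      (fun (acc : Int × Int) (i : Int) =>
        if i % 2 == 0 then (acc.1 + PySem.List.pyGetD l i 0, acc.2)
        else (acc.1, acc.2 + PySem.List.pyGetD l i 0)) (0, 0)
    = ((pvSums l).1, (pvSums l).2) := by
  rw [PySem.List.len_eq, PySem.List.pyRange_one]
  simp only [Int.sub_zero, Int.toNat_natCast, List.foldl_map, Int.zero_add]
  rw [List.range_eq_range']
  have := pvAuxA l l 0 0 0 (by simp)
  simpa using this

-- ===== VERDICT (by name: the statement is the Claim_ definition above) =====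
theorem filterValisSum_spec : Claim_equal_filterValisSum := by
  intro l _ hpre
  unfold Spec_filterValisSum filterValisSum filterValisSum_alt
  cases l with
  | nil => exact absurd rfl hpre
  | cons x r =>
    have hg : PySem.List.pyGet? (x :: r) 0 = some x := by
      simp [PySem.List.pyGet?, PySem.List.pyIdx?]
    rw [hg]
    by_cases hx : x = 0
    · simp [hx]
    · simp only [show (x == 0) = false by simp [hx], Bool.false_eq_true, if_false]
      rw [pvLoopA, pvSlice_evens, pvSlice_odds, Option.getD_some, Option.getD_some]
      obtain ⟨h1, h2⟩ := pvSums_eq_evens (x :: r)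
      rw [← h1, ← h2]
      by_cases h : (pvSums (x :: r)).2 = (pvSums (x :: r)).1
      · simp [h]
      · simp [h]; omega
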